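-- pv_equiv track=rewrite | github.com/sresis/practice-problems | inner-brackets/inner-brackets.py | inner_bracket
-- ===== SOURCE A (Python) =====
-- def inner_bracket(string):
--     outers = ('(', '{', '[')
--     inners = (')', '}', ']')
--     outer_count = 0
--     current_str = ""
--     final_list = []
--     max_len = 0
--     for i in range(len(string)):
--         if string[i] in outers:
--             outer_count += 1
--             current_str = ""
--         elif string[i] in inners:
--             if outer_count > max_len:
--                 final_list = [current_str]
--                 max_len = outer_count
--             elif outer_count == max_len:
--                 final_list.append(current_str)
--             else:
--                 pass
--             current_str= ""
--             outer_count -= 1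
--         else:
--             current_str += string[i]
--
--     if max_len == 0:
--         return [string]
--     return final_list
-- ===== SOURCE B (Python) =====
-- def inner_bracket(string):
--     # collect (depth, text) for every closing bracket, then filter by the max depth
--     segs = []
--     depth = 0
--     buf = []
--     for ch in string:
--         if ch in '({[':
--             depth += 1
--             buf = []
--         elif ch in ')}]':
--             segs.append((depth, ''.join(buf)))
--             buf = []
--             depth -= 1
--         else:
--             buf.append(ch)
--     m = max((d for d, _ in segs), default=0)
--     if m <= 0:
--         return [string]
--     return [t for d, t in segs if d == m]
-- ===== Notes on version B (the rewrite author's own statement) =====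
-- stated objective: alternative
-- what changed: B records every (depth, text) pair at each closing bracket in one collect pass and then filters by the maximum recorded depth, instead of A's inline running-maximum with conditional rebuilding/appending of the result list during the scan.
import Mathlib
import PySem

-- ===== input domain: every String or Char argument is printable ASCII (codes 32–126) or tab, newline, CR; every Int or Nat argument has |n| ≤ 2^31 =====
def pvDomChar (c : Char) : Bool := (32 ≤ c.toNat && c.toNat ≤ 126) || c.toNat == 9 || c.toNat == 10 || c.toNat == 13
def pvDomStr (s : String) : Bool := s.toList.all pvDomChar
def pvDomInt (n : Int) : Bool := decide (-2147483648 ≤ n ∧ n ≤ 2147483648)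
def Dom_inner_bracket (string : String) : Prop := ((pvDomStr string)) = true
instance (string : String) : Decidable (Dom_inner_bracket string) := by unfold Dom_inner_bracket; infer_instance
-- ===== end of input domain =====

-- B replaces A's running-maximum rebuilding of the result list by collecting every
-- (depth, text) pair once and filtering by the maximum depth afterwards (objective: alternative).

-- ===== PORT A =====
-- state: (outer_count, current_str as chars, final_list, max_len)
def innerAStep (st : Int × List Char × List String × Int) (c : Char) :
    Int × List Char × List String × Int :=
  if c ∈ ['(', '{', '['] then (st.1 + 1, [], st.2.2.1, st.2.2.2)
  else if c ∈ [')', '}', ']'] then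
    if st.2.2.2 < st.1 then (st.1 - 1, [], [String.ofList st.2.1], st.1)
    else if st.1 = st.2.2.2 then (st.1 - 1, [], st.2.2.1 ++ [String.ofList st.2.1], st.2.2.2)
    else (st.1 - 1, [], st.2.2.1, st.2.2.2)
  else (st.1, st.2.1 ++ [c], st.2.2.1, st.2.2.2)

def innerAFinish (string : String) (st : Int × List Char × List String × Int) : List String :=
  if st.2.2.2 = 0 then [string] else st.2.2.1

def inner_bracket (string : String) : List String :=
  innerAFinish string (string.toList.foldl innerAStep (0, [], [], 0))

-- ===== PORT B =====
-- state: (depth, buf as chars, segs = list of (depth-at-close, text))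
def innerBStep (st : Int × List Char × List (Int × String)) (c : Char) :
    Int × List Char × List (Int × String) :=
  if c ∈ ['(', '{', '['] then (st.1 + 1, [], st.2.2)
  else if c ∈ [')', '}', ']'] then (st.1 - 1, [], st.2.2 ++ [(st.1, String.ofList st.2.1)])
  else (st.1, st.2.1 ++ [c], st.2.2)

-- m = max of the recorded depths (default 0, as Python's max(..., default=0))
def innerBFinish (string : String) (segs : List (Int × String)) : List String :=
  let m : Int :=
    match segs.map Prod.fst with
    | [] => 0
    | d :: t => t.foldl max d
  if m ≤ 0 then [string]
  else (segs.filter (fun p => p.1 == m)).map Prod.snd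

def inner_bracket_alt (string : String) : List String :=
  innerBFinish string (string.toList.foldl innerBStep (0, [], [])).2.2

-- ===== PRECONDITION & SPEC =====
def Spec_inner_bracket (string : String) (out : List String) : Prop := out = inner_bracket_alt string
instance (string : String) (out : List String) : Decidable (Spec_inner_bracket string out) := by unfold Spec_inner_bracket; infer_instance

-- ===== CLAIM (what is proved, stated in full; the proofs are below) =====
def Claim_equal_inner_bracket : Prop := ∀ (string : String), Dom_inner_bracket string → Spec_inner_bracket string (inner_bracket string)

-- ===== LEMMAS AND PROOFS =====

/-- A's running max_len, expressed as a function of B's collected segments. -/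
def mlOf (segs : List (Int × String)) : Int :=
  segs.foldl (fun a p => max a p.1) 0

/-- A's final_list, expressed as a function of B's collected segments. -/
def flOf (segs : List (Int × String)) : List String :=
  (segs.filter (fun p => p.1 == mlOf segs)).map Prod.snd

theorem le_foldlMax (l : List (Int × String)) (a : Int) :
    a ≤ l.foldl (fun x p => max x p.1) a := by
  induction l generalizing a with
  | nil => simp
  | cons q t ih => exact le_trans (le_max_left a q.1) (ih _)

theorem mem_le_foldlMax (l : List (Int × String)) : ∀ (a : Int) (p : Int × String),
    p ∈ l → p.1 ≤ l.foldl (fun x p => max x p.1) a := by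
  induction l with
  | nil => intro a p hp; cases hp
  | cons q t ih =>
    intro a p hp
    rcases List.mem_cons.mp hp with h | h
    · subst h
      exact le_trans (le_max_right a p.1) (le_foldlMax t _)
    · exact ih _ p h

theorem mem_le_ml (segs : List (Int × String)) (p : Int × String) (hp : p ∈ segs) :
    p.1 ≤ mlOf segs := mem_le_foldlMax segs 0 p hp

theorem ml_snoc (segs : List (Int × String)) (d : Int) (s : String) :
    mlOf (segs ++ [(d, s)]) = max (mlOf segs) d := by
  simp [mlOf, List.foldl_append]

theorem fl_snoc_gt (segs : List (Int × String)) (d : Int) (s : String)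
    (h : mlOf segs < d) : flOf (segs ++ [(d, s)]) = [s] := by
  unfold flOf
  rw [ml_snoc, max_eq_right (le_of_lt h), List.filter_append]
  have h0 : segs.filter (fun p => p.1 == d) = [] := by
    refine List.filter_eq_nil_iff.mpr (fun p hp => ?_)
    have hle := mem_le_ml segs p hp
    simp only [beq_iff_eq]
    omega
  rw [h0]
  simp

theorem fl_snoc_eq (segs : List (Int × String)) (d : Int) (s : String)
    (h : d = mlOf segs) : flOf (segs ++ [(d, s)]) = flOf segs ++ [s] := by
  subst h
  unfold flOf
  rw [ml_snoc, max_self, List.filter_append]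
  simp

theorem fl_snoc_lt (segs : List (Int × String)) (d : Int) (s : String)
    (h : d < mlOf segs) : flOf (segs ++ [(d, s)]) = flOf segs := by
  unfold flOf
  rw [ml_snoc, max_eq_left (le_of_lt h), List.filter_append]
  have h0 : ([(d, s)]).filter (fun p => p.1 == mlOf segs) = [] := by
    simp only [List.filter_cons, List.filter_nil, beq_iff_eq]
    rw [if_neg (by omega)]
  rw [h0]
  simp

/-- Main invariant: A's fold state is the image of B's fold state under (mlOf, flOf). -/
theorem fold_rel (l : List Char) (d : Int) (cs : List Char) (segs : List (Int × String)) :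
    l.foldl innerAStep (d, cs, flOf segs, mlOf segs) =
      ((l.foldl innerBStep (d, cs, segs)).1,
       (l.foldl innerBStep (d, cs, segs)).2.1,
       flOf (l.foldl innerBStep (d, cs, segs)).2.2,
       mlOf (l.foldl innerBStep (d, cs, segs)).2.2) := by
  induction l generalizing d cs segs with
  | nil => rfl
  | cons c t ih =>
    simp only [List.foldl_cons]
    by_cases h1 : c ∈ ['(', '{', '[']
    · rw [show innerAStep (d, cs, flOf segs, mlOf segs) c
            = (d + 1, ([] : List Char), flOf segs, mlOf segs) from by simp [innerAStep, h1],
          show innerBStep (d, cs, segs) c = (d + 1, ([] : List Char), segs) from by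
            simp [innerBStep, h1]]
      exact ih (d + 1) [] segs
    · by_cases h2 : c ∈ [')', '}', ']']
      · rw [show innerBStep (d, cs, segs) c
              = (d - 1, ([] : List Char), segs ++ [(d, String.ofList cs)]) from by
                simp [innerBStep, h1, h2]]
        by_cases h3 : mlOf segs < d
        · rw [show innerAStep (d, cs, flOf segs, mlOf segs) c
                = (d - 1, ([] : List Char), [String.ofList cs], d) from by
                  simp [innerAStep, h1, h2, h3]]
          have key := ih (d - 1) [] (segs ++ [(d, String.ofList cs)])
          rw [fl_snoc_gt segs d (String.ofList cs) h3, ml_snoc,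
              max_eq_right (le_of_lt h3)] at key
          exact key
        · by_cases h4 : d = mlOf segs
          · rw [show innerAStep (d, cs, flOf segs, mlOf segs) c
                  = (d - 1, ([] : List Char), flOf segs ++ [String.ofList cs], mlOf segs) from by
                    simp [innerAStep, h1, h2, h4]]
            have key := ih (d - 1) [] (segs ++ [(d, String.ofList cs)])
            rw [fl_snoc_eq segs d (String.ofList cs) h4, ml_snoc,
                max_eq_left (not_lt.mp h3)] at key
            exact key
          · rw [show innerAStep (d, cs, flOf segs, mlOf segs) c
                  = (d - 1, ([] : List Char), flOf segs, mlOf segs) from by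
                    simp [innerAStep, h1, h2, h3, h4]]
            have key := ih (d - 1) [] (segs ++ [(d, String.ofList cs)])
            rw [fl_snoc_lt segs d (String.ofList cs) (by omega), ml_snoc,
                max_eq_left (not_lt.mp h3)] at key
            exact key
      · rw [show innerAStep (d, cs, flOf segs, mlOf segs) c
              = (d, cs ++ [c], flOf segs, mlOf segs) from by simp [innerAStep, h1, h2],
            show innerBStep (d, cs, segs) c = (d, cs ++ [c], segs) from by
              simp [innerBStep, h1, h2]]
        exact ih d (cs ++ [c]) segs

theorem foldlMax_shift (l : List Int) (a b : Int) :
    l.foldl max (max a b) = max a (l.foldl max b) := by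
  induction l generalizing b with
  | nil => simp
  | cons c t ih =>
    simp only [List.foldl_cons]
    rw [max_assoc, ih]

theorem mlOf_eq_map (segs : List (Int × String)) :
    mlOf segs = (segs.map Prod.fst).foldl max 0 := by
  simp [mlOf, List.foldl_map]

theorem finish_eq (s : String) (segs : List (Int × String)) :
    (if mlOf segs = 0 then [s] else flOf segs) = innerBFinish s segs := by
  cases segs with
  | nil => simp [mlOf, innerBFinish]
  | cons p t =>
    have hml : mlOf (p :: t) = max 0 ((t.map Prod.fst).foldl max p.1) := by
      rw [mlOf_eq_map]
      simp only [List.map_cons, List.foldl_cons]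
      exact foldlMax_shift _ 0 p.1
    unfold innerBFinish
    simp only [List.map_cons]
    by_cases hm : (t.map Prod.fst).foldl max p.1 ≤ 0
    · have h0 : mlOf (p :: t) = 0 := by rw [hml]; exact max_eq_left hm
      rw [if_pos h0, if_pos hm]
    · rw [not_le] at hm
      have h0 : mlOf (p :: t) = (t.map Prod.fst).foldl max p.1 := by
        rw [hml]; exact max_eq_right hm.le
      rw [if_neg (by omega), if_neg (by omega)]
      unfold flOf
      rw [h0]

-- ===== VERDICT (by name: the statement is the Claim_ definition above) =====
theorem inner_bracket_spec : Claim_equal_inner_bracket := by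
  intro s _
  unfold Spec_inner_bracket inner_bracket inner_bracket_alt innerAFinish
  have h := fold_rel s.toList 0 [] []
  have h0 : flOf [] = [] := rfl
  have h1 : mlOf [] = 0 := rfl
  rw [h0, h1] at h
  rw [h]
  exact finish_eq s _
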